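-- pv_equiv track=rewrite | github.com/jonachung/uvaproblems | p00401.py | isMirroredString
-- ===== SOURCE A (Python) =====
-- def isMirroredString(string):
--     mirroredReference = {'E' : '3','J' : 'L', 'L' : 'J', 'S' : '2', '2' : 'S', '3' : 'E', '5' : 'Z'}
--     mirroredString = ""
--     for index in range(len(string)):
--         if string[index] in mirroredReference:
--             mirroredString += mirroredReference.get(string[index])
--         else:
--             mirroredString += string[index]
--     reversedMirrorString = mirroredString[::-1]
--     return reversedMirrorString == string
-- ===== SOURCE B (Python) =====
-- def isMirroredString(string):
--     mirror = {'E': '3', 'J': 'L', 'L': 'J', 'S': '2', '2': 'S', '3': 'E', '5': 'Z'}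
--     lo, hi = 0, len(string) - 1
--     while lo < hi:
--         if mirror.get(string[hi], string[hi]) != string[lo] \
--                 or mirror.get(string[lo], string[lo]) != string[hi]:
--             return False
--         lo += 1
--         hi -= 1
--     if lo == hi:
--         return mirror.get(string[lo], string[lo]) == string[lo]
--     return True
-- ===== Notes on version B (the rewrite author's own statement) =====
-- stated objective: alternative
-- what changed: B builds no mirrored copy and no reversed string: a two-pointer while loop walks inward from both ends, checking each outer pair (mirror of the right char equals the left char and vice versa) and finally the center char against its own mirror, returning False at the first mismatch after at most n/2 iterations.
import Mathlib
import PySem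

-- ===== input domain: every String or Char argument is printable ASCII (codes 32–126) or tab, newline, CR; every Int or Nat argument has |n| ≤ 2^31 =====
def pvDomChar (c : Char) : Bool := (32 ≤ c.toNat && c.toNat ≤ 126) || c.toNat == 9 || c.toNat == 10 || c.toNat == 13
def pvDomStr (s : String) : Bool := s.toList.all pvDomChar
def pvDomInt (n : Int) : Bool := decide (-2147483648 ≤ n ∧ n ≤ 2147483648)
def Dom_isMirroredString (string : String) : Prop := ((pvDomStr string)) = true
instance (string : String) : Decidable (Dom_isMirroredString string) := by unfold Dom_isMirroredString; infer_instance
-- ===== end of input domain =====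

-- B: instead of building a mirrored copy by repeated concatenation and reversing it, a two-pointer while loop walks inward from both ends checking each outer pair and the center char (alternative decomposition, same cost).


-- ===== PORT A =====
-- the mirroredReference dict (shared literal constant of both Pythons)
def pvMirrorRef : PySem.Dict Char Char :=
  PySem.Dict.ofList [('E','3'),('J','L'),('L','J'),('S','2'),('2','S'),('3','E'),('5','Z')]

def isMirroredString (string : String) : Bool :=
  let cs := string.toList
  let mirroredString :=
    (PySem.List.pyRange 0 cs.length 1).foldl (fun acc index =>
      if (PySem.Dict.get? pvMirrorRef (PySem.List.pyGetD cs index ' ')).isSome then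
        acc ++ [(PySem.Dict.get? pvMirrorRef (PySem.List.pyGetD cs index ' ')).getD ' ']
      else
        acc ++ [PySem.List.pyGetD cs index ' ']) ([] : List Char)
  let reversedMirrorString := (PySem.List.slice? mirroredString none none (-1)).getD []
  reversedMirrorString == cs

-- ===== PORT B =====
-- mirror.get(c, c) of Source B
def pvM (c : Char) : Char := (PySem.Dict.get? pvMirrorRef c).getD c

-- the two-pointer while loop of Source B (while lo < hi: pair check, move inward; then the center check)
def pvOk (cs : List Char) (lo hi : Int) : Bool :=
  if lo < hi then
    (pvM (PySem.List.pyGetD cs hi ' ') == PySem.List.pyGetD cs lo ' ')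
      && (pvM (PySem.List.pyGetD cs lo ' ') == PySem.List.pyGetD cs hi ' ')
      && pvOk cs (lo + 1) (hi - 1)
  else if lo = hi then
    pvM (PySem.List.pyGetD cs lo ' ') == PySem.List.pyGetD cs lo ' '
  else true
termination_by (hi - lo + 1).toNat
decreasing_by omega

def isMirroredString_alt (string : String) : Bool :=
  pvOk string.toList 0 ((string.toList.length : Int) - 1)

-- ===== PRECONDITION & SPEC =====
def Spec_isMirroredString (string : String) (out : Bool) : Prop := out = isMirroredString_alt string
instance (string : String) (out : Bool) : Decidable (Spec_isMirroredString string out) := by unfold Spec_isMirroredString; infer_instance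

-- ===== CLAIM (what is proved, stated in full; the proofs are below) =====
def Claim_equal_isMirroredString : Prop := ∀ (string : String), Dom_isMirroredString string → Spec_isMirroredString string (isMirroredString string)

-- ===== LEMMAS AND PROOFS =====
-- A's loop body applied to a char is 'append pvM c'
theorem pvA_body (acc : List Char) (c : Char) :
    (if (PySem.Dict.get? pvMirrorRef c).isSome then
        acc ++ [(PySem.Dict.get? pvMirrorRef c).getD ' ']
      else acc ++ [c]) = acc ++ [pvM c] := by
  unfold pvM
  cases h : PySem.Dict.get? pvMirrorRef c <;> simp_all

theorem pvFoldl_map (cs : List Char) (acc : List Char) :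
    cs.foldl (fun acc c => acc ++ [pvM c]) acc = acc ++ cs.map pvM := by
  induction cs generalizing acc with
  | nil => simp
  | cons c cs ih => simp [List.foldl_cons, ih]

theorem pvA_eq (string : String) :
    isMirroredString string = ((string.toList.map pvM).reverse == string.toList) := by
  unfold isMirroredString
  simp only
  rw [show (fun (acc : List Char) (index : Int) =>
      if (PySem.Dict.get? pvMirrorRef (PySem.List.pyGetD string.toList index ' ')).isSome then
        acc ++ [(PySem.Dict.get? pvMirrorRef (PySem.List.pyGetD string.toList index ' ')).getD ' ']
      else acc ++ [PySem.List.pyGetD string.toList index ' '])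
    = (fun (acc : List Char) (index : Int) =>
        acc ++ [pvM (PySem.List.pyGetD string.toList index ' ')]) from
    funext fun acc => funext fun i => pvA_body acc _]
  rw [PySem.List.foldl_pyRange_zero_pyGetD' string.toList ' ' (fun acc c => acc ++ [pvM c]) []]
  rw [pvFoldl_map, PySem.List.slice?_none_none_neg_one]
  simp

-- characterization of the two-pointer recursion over its window [lo, hi]
theorem pvOk_iff (cs : List Char) (lo hi : Int) (h0 : 0 ≤ lo) (h1 : hi < (cs.length : Int)) :
    pvOk cs lo hi = true ↔
      ∀ k : Int, lo ≤ k → k ≤ hi →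
        pvM (PySem.List.pyGetD cs (lo + hi - k) ' ') = PySem.List.pyGetD cs k ' ' := by
  induction lo, hi using pvOk.induct with
  | case1 lo hi hlt ih =>
    rw [pvOk]
    simp only [if_pos hlt, Bool.and_eq_true, beq_iff_eq]
    rw [ih (by omega) (by omega)]
    constructor
    · rintro ⟨⟨c1, c2⟩, hin⟩ k hk1 hk2
      by_cases hk : k = lo
      · subst hk
        have e : k + hi - k = hi := by omega
        rw [e]; exact c1
      · by_cases hk' : k = hi
        · subst hk'
          have e : lo + k - k = lo := by omega
          rw [e]; exact c2
        · have := hin k (by omega) (by omega)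
          have e : lo + 1 + (hi - 1) - k = lo + hi - k := by omega
          rwa [e] at this
    · intro h
      refine ⟨⟨?_, ?_⟩, ?_⟩
      · have := h lo (le_refl _) (by omega)
        have e : lo + hi - lo = hi := by omega
        rwa [e] at this
      · have := h hi (by omega) (le_refl _)
        have e : lo + hi - hi = lo := by omega
        rwa [e] at this
      · intro k hk1 hk2
        have := h k (by omega) (by omega)
        have e : lo + 1 + (hi - 1) - k = lo + hi - k := by omega
        rw [e]; exact this
  | case2 lo hnlt =>
    rw [pvOk]
    simp only [if_neg (show ¬ lo < lo from by omega), if_true, beq_iff_eq]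
    constructor
    · intro h k hk1 hk2
      have hk : k = lo := by omega
      rw [hk, show lo + lo - lo = lo from by omega]
      exact h
    · intro h
      have := h lo (le_refl _) (le_refl _)
      have e : lo + lo - lo = lo := by omega
      rwa [e] at this
  | case3 lo hi hnlt hne =>
    rw [pvOk]
    simp only [if_neg hnlt, if_neg hne, true_iff]
    intro k hk1 hk2; omega

theorem pvRev_get (cs : List Char) (i : Nat) (h : i < cs.length) :
    ((cs.map pvM).reverse)[i]'(by simpa using h) = pvM (cs[cs.length-1-i]'(by omega)) := by
  simp only [List.getElem_reverse, List.getElem_map, List.length_map]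

theorem pvKey (cs : List Char) :
    ((cs.map pvM).reverse = cs) ↔
      ∀ i, i < cs.length → pvM (cs.getD (cs.length-1-i) ' ') = cs.getD i ' ' := by
  constructor
  · intro h i hi
    rw [List.getD_eq_getElem _ _ (show cs.length-1-i < cs.length by omega),
        List.getD_eq_getElem _ _ hi, ← pvRev_get cs i hi]
    exact List.getElem_of_eq h _
  · intro h
    apply List.ext_getElem (by simp)
    intro i h1 h2
    rw [pvRev_get cs i h2]
    have := h i h2
    rwa [List.getD_eq_getElem _ _ (show cs.length-1-i < cs.length by omega),
         List.getD_eq_getElem _ _ h2] at this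

-- bridge: the Int-indexed two-pointer condition over [0, n-1] is pvKey's Nat-indexed one
theorem pvBridge (cs : List Char) :
    (pvOk cs 0 ((cs.length : Int) - 1) = true) ↔ ((cs.map pvM).reverse = cs) := by
  rw [pvOk_iff cs 0 _ (le_refl _) (by omega), pvKey]
  constructor
  · intro h i hi
    have := h (i : Int) (by omega) (by omega)
    have e1 : 0 + ((cs.length : Int) - 1) - (i : Int) = ((cs.length - 1 - i : Nat) : Int) := by
      omega
    rw [e1, PySem.List.pyGetD_natCast, PySem.List.pyGetD_natCast] at this
    exact this
  · intro h k hk1 hk2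
    have hk : k.toNat < cs.length := by omega
    have := h k.toNat hk
    have e1 : 0 + ((cs.length : Int) - 1) - k = ((cs.length - 1 - k.toNat : Nat) : Int) := by
      omega
    have e2 : k = ((k.toNat : Nat) : Int) := by omega
    rw [e1, e2, PySem.List.pyGetD_natCast, PySem.List.pyGetD_natCast]
    exact this

theorem pvMain (string : String) :
    isMirroredString string = isMirroredString_alt string := by
  rw [pvA_eq]
  unfold isMirroredString_alt
  rw [Bool.eq_iff_iff]
  simp only [beq_iff_eq]
  exact (pvBridge string.toList).symm

-- ===== VERDICT (by name: the statement is the Claim_ definition above) =====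
theorem isMirroredString_spec : Claim_equal_isMirroredString := by
  intro string _
  exact pvMain string
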